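-- pv_equiv track=rewrite | github.com/Pannic17/CSC108-Assignments | a3/network_functions.py | basic_recommend
-- ===== SOURCE A (Python) =====
-- from typing import List, Tuple, Dict, TextIO
--
-- def recommend_friends(person: str, person_to_friends: Dict[str, List[str]]) -> List[str]:
--     """return a name to add a score according to friends
--     """
--     name_list = []
--     for pi in person_to_friends[person]:
--         for pj in person_to_friends:
--             for pk in person_to_friends[pj]:
--                 if pi == pj and pk != person:
--                     name_list.append(pk)
--     return name_list
--
-- def recommend_networks(person: str, person_to_networks: Dict[str, List[str]]) \
--         -> List[str]:
--     """return a name to add a score according to networks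
--     """
--     name_list = []
--     for ni in person_to_networks[person]:
--         for nj in person_to_networks:
--             for nk in person_to_networks[nj]:
--                 if ni == nk and nj != person:
--                     name_list.append(nj)
--     return name_list
--
-- def basic_recommend(person: str, person_to_friends: Dict[str, List[str]], \
--                     person_to_networks: Dict[str, List[str]]) -> Dict[str, int]:
--     """return a list of friend with basic calculation
--     """
--     recommendations = {}
--     if not person in person_to_friends:
--         person_to_friends[person] = []
--     if not person in person_to_networks:
--         person_to_networks[person] = []
--     # friends
--     plist = recommend_friends(person, person_to_friends)
--     for pk in plist:
--         if not (pk in recommendations):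
--             recommendations[pk] = 1
--         else:
--             recommendations[pk] = recommendations[pk] + 1
--     # networks
--     nlist = recommend_networks(person, person_to_networks)
--     for nj in nlist:
--         if not (nj in recommendations):
--             recommendations[nj] = 1
--         else:
--             recommendations[nj] = recommendations[nj] + 1
--     return recommendations
-- ===== SOURCE B (Python) =====
-- def basic_recommend(person, person_to_friends, person_to_networks):
--     scores = {}
--     # friends of friends: look each friend's list up directly instead of
--     # rescanning every key of the dict for every friend
--     for pi in person_to_friends.get(person, []):
--         for pk in person_to_friends.get(pi, []):
--             if pk != person:
--                 scores[pk] = scores.get(pk, 0) + 1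
--     # networks: inverse index restricted to the networks person is in:
--     # network name -> members other than person, in key order, one entry per occurrence
--     pnets = person_to_networks.get(person, [])
--     if pnets:
--         wanted = set(pnets)
--         members = {}
--         for pj, nets in person_to_networks.items():
--             if pj != person:
--                 for nk in nets:
--                     if nk in wanted:
--                         members.setdefault(nk, []).append(pj)
--         for ni in pnets:
--             for pj in members.get(ni, []):
--                 scores[pj] = scores.get(pj, 0) + 1
--     return scores
-- ===== Notes on version B (the rewrite author's own statement) =====
-- stated objective: alternative
-- what changed: Replaced the nested rescans of every dict key per friend/network (and the intermediate name lists) by direct friends-of-friends lookups and an inverse index (network -> members, restricted to the person's networks), updating the score dict in one pass; B also does not mutate its dict arguments as A does.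
import Mathlib
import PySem

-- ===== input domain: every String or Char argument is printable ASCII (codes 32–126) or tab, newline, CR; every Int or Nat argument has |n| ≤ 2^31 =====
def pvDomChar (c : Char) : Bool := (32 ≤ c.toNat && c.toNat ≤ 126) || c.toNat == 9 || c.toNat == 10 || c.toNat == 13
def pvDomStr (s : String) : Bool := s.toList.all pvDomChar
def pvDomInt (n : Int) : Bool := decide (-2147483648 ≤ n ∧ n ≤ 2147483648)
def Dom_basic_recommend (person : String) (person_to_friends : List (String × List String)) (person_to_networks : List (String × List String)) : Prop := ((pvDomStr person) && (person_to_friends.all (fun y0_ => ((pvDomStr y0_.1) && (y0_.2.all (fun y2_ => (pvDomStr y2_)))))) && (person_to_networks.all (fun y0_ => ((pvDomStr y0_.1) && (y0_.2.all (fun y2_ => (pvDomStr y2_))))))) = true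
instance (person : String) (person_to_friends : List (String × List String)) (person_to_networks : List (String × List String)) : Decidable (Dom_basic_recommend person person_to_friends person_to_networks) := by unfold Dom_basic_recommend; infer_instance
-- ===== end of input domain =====

-- B replaces A's rescans of every dict key per friend/network by direct friend lookups and an
-- inverse index (network → members, restricted to the person's networks) — a different algorithm
-- of similar measured cost. Equivalence is about the RETURN value only: Python A inserts
-- person→[] into both dict arguments when absent; B does not mutate its arguments.

-- ===== PORT A =====
-- shared input marshalling: rebuild the Python dict from the association list exactly as
-- dict construction does (insertion order, a later duplicate key overwrites in place)
def pvToDict (l : List (String × List String)) : PySem.Dict String (List String) :=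
  l.foldl (fun d p => d.insert p.1 p.2) PySem.Dict.empty

def recommend_friends (person : String) (d : PySem.Dict String (List String)) : List String :=
  (d.getD person []).foldl (fun nl pi =>
    d.keys.foldl (fun nl pj =>
      (d.getD pj []).foldl (fun nl pk =>
        if pi == pj && pk != person then nl ++ [pk] else nl) nl) nl) []

def recommend_networks (person : String) (e : PySem.Dict String (List String)) : List String :=
  (e.getD person []).foldl (fun nl ni =>
    e.keys.foldl (fun nl nj =>
      (e.getD nj []).foldl (fun nl nk =>
        if ni == nk && nj != person then nl ++ [nj] else nl) nl) nl) []

def basic_recommend (person : String) (person_to_friends : List (String × List String)) (person_to_networks : List (String × List String)) : List (String × Int) :=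
  let d0 := pvToDict person_to_friends
  let d := if d0.contains person then d0 else d0.insert person []
  let e0 := pvToDict person_to_networks
  let e := if e0.contains person then e0 else e0.insert person []
  let plist := recommend_friends person d
  let r1 := plist.foldl (fun r pk =>
    if !(r.contains pk) then r.insert pk 1 else r.insert pk (r.getD pk 0 + 1)) PySem.Dict.empty
  let nlist := recommend_networks person e
  let r2 := nlist.foldl (fun r nj =>
    if !(r.contains nj) then r.insert nj 1 else r.insert nj (r.getD nj 0 + 1)) r1
  r2.items

-- ===== PORT B =====
def basic_recommend_alt (person : String) (person_to_friends : List (String × List String)) (person_to_networks : List (String × List String)) : List (String × Int) :=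
  let fd := pvToDict person_to_friends
  let nd := pvToDict person_to_networks
  let s1 := (fd.getD person []).foldl (fun s pi =>
      (fd.getD pi []).foldl (fun s pk =>
        if pk != person then s.insert pk (s.getD pk 0 + 1) else s) s) PySem.Dict.empty
  let pnets := nd.getD person []
  let s2 :=
    if pnets.isEmpty then s1
    else
      let wanted := PySem.Set.ofList pnets
      let members := nd.items.foldl (fun m p =>
          if p.1 != person then
            p.2.foldl (fun m nk =>
              if wanted.contains nk then m.modify nk [] (· ++ [p.1]) else m) m
          else m) PySem.Dict.empty
      pnets.foldl (fun s ni =>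
          (members.getD ni []).foldl (fun s pj => s.insert pj (s.getD pj 0 + 1)) s) s1
  s2.items

-- ===== PRECONDITION & SPEC =====
def Spec_basic_recommend (person : String) (person_to_friends : List (String × List String)) (person_to_networks : List (String × List String)) (out : List (String × Int)) : Prop := out = basic_recommend_alt person person_to_friends person_to_networks
instance (person : String) (person_to_friends : List (String × List String)) (person_to_networks : List (String × List String)) (out : List (String × Int)) : Decidable (Spec_basic_recommend person person_to_friends person_to_networks out) := by unfold Spec_basic_recommend; infer_instance

-- ===== CLAIM (what is proved, stated in full; the proofs are below) =====
def Claim_equal_basic_recommend : Prop := ∀ (person : String) (person_to_friends : List (String × List String)) (person_to_networks : List (String × List String)), Dom_basic_recommend person person_to_friends person_to_networks → Spec_basic_recommend person person_to_friends person_to_networks (basic_recommend person person_to_friends person_to_networks)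

-- ===== LEMMAS AND PROOFS =====

-- the score update both programs perform
def pvIns (r : PySem.Dict String Int) (x : String) : PySem.Dict String Int :=
  r.insert x (r.getD x 0 + 1)

-- the friend-recommendation name sequence, in closed form
def pvFSeq (fd : PySem.Dict String (List String)) (person : String) : List String :=
  (fd.getD person []).flatMap (fun pi => (fd.getD pi []).filter (fun pk => pk != person))

-- the members of network ni other than person, in key order, one entry per occurrence
def pvMem (nd : PySem.Dict String (List String)) (person ni : String) : List String :=
  nd.keys.flatMap (fun nj =>
    if nj != person then ((nd.getD nj []).filter (fun nk => nk == ni)).map (fun _ => nj) else [])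

def pvNSeq (nd : PySem.Dict String (List String)) (person : String) : List String :=
  (nd.getD person []).flatMap (fun ni => pvMem nd person ni)

theorem pvIns_branch (r : PySem.Dict String Int) (x : String) :
    (if !(r.contains x) then r.insert x 1 else r.insert x (r.getD x 0 + 1)) = pvIns r x := by
  cases h : r.contains x with
  | false => simp [pvIns, PySem.Dict.getD_of_not_contains r 0 h]
  | true => simp [pvIns]

theorem pv_nodup_toDict (l : List (String × List String)) : (pvToDict l).keys.Nodup := by
  unfold pvToDict
  exact PySem.Dict.nodup_keys_foldl_insert_key l (fun p => p.1) (fun d x => x.2) PySem.Dict.empty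
    (by simp [PySem.Dict.keys_empty])

theorem pv_getD_default (nd : PySem.Dict String (List String)) (person x : String) :
    ((if nd.contains person then nd else nd.insert person []).getD x ([] : List String))
      = nd.getD x [] := by
  cases h : nd.contains person with
  | true => simp
  | false =>
    rw [if_neg (by simp)]
    by_cases hx : x = person
    · subst hx
      rw [PySem.Dict.getD_insert_self, PySem.Dict.getD_of_not_contains nd [] h]
    · exact PySem.Dict.getD_insert_of_ne nd [] [] hx

theorem pv_nodup_default (nd : PySem.Dict String (List String)) (person : String)
    (h : nd.keys.Nodup) :
    (if nd.contains person then nd else nd.insert person []).keys.Nodup := by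
  cases hc : nd.contains person with
  | true => simpa using h
  | false =>
    rw [if_neg (by simp)]
    rw [PySem.Dict.keys_insert_of_not_contains nd [] hc]
    have hmem : person ∉ nd.keys := by
      have := PySem.Dict.contains_eq_decide_mem_keys nd person
      rw [hc] at this
      simpa using this.symm
    rw [List.nodup_append]
    refine ⟨h, List.nodup_singleton person, ?_⟩
    intro a ha
    simp only [List.mem_singleton]
    rintro b rfl e
    exact hmem (e ▸ ha)

-- innermost friend loop in closed form
theorem pv_friends_inner (person pi pj : String) (l nl : List String) :
    (l.foldl (fun nl pk => if pi == pj && pk != person then nl ++ [pk] else nl) nl)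
      = nl ++ l.filter (fun pk => pi == pj && pk != person) := by
  have := PySem.List.foldl_append_if (fun pk => pi == pj && pk != person) (fun pk => pk) l nl
  simpa using this

-- collapsing the key scan: with distinct keys at most one key matches pi
theorem pv_collapse (keys : List String) (hnd : keys.Nodup) (pi person : String)
    (f : String → List String) :
    keys.flatMap (fun pj => (f pj).filter (fun pk => pi == pj && pk != person))
      = if pi ∈ keys then (f pi).filter (fun pk => pk != person) else [] := by
  induction keys with
  | nil => simp
  | cons k t ih =>
    have hk : k ∉ t := (List.nodup_cons.mp hnd).1
    have ht : t.Nodup := (List.nodup_cons.mp hnd).2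
    by_cases hpk : pi = k
    · subst hpk
      have hrest : pi ∉ t := hk
      simp [List.flatMap_cons, ih ht, hrest]
    · have : (pi == k) = false := by simp [hpk]
      simp [List.flatMap_cons, this, ih ht, hpk]

theorem pv_rf_closed (person : String) (d : PySem.Dict String (List String))
    (hnd : d.keys.Nodup) :
    recommend_friends person d = pvFSeq d person := by
  unfold recommend_friends pvFSeq
  have step1 : ∀ (pi : String) (nl : List String),
      d.keys.foldl (fun nl pj =>
        (d.getD pj []).foldl (fun nl pk =>
          if pi == pj && pk != person then nl ++ [pk] else nl) nl) nl
        = nl ++ (d.getD pi []).filter (fun pk => pk != person) := by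
    intro pi nl
    simp only [pv_friends_inner]
    rw [PySem.List.foldl_append_eq_flatMap]
    rw [pv_collapse d.keys hnd pi person (fun pj => d.getD pj [])]
    by_cases hm : pi ∈ d.keys
    · simp [hm]
    · have hc : d.contains pi = false := by
        rw [PySem.Dict.contains_eq_decide_mem_keys]; simpa using hm
      simp [hm, PySem.Dict.getD_of_not_contains d [] hc]
  simp only [step1]
  rw [PySem.List.foldl_append_eq_flatMap]
  simp

-- innermost network loop in closed form
theorem pv_networks_inner (person ni nj : String) (l nl : List String) :
    (l.foldl (fun nl nk => if ni == nk && nj != person then nl ++ [nj] else nl) nl)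
      = nl ++ (if nj != person then (l.filter (fun nk => nk == ni)).map (fun _ => nj) else []) := by
  have := PySem.List.foldl_append_if (fun nk => ni == nk && nj != person) (fun _ => nj) l nl
  rw [this]
  by_cases h : nj = person
  · simp [h]
  · have h' : (nj != person) = true := by simp [h]
    simp only [h', Bool.and_true, if_true]
    congr 1
    congr 1
    exact List.filter_congr (fun nk _ => Bool.beq_comm)

theorem pv_rn_closed (person : String) (e : PySem.Dict String (List String)) :
    recommend_networks person e = pvNSeq e person := by
  unfold recommend_networks pvNSeq pvMem
  have step1 : ∀ (ni : String) (nl : List String),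
      e.keys.foldl (fun nl nj =>
        (e.getD nj []).foldl (fun nl nk =>
          if ni == nk && nj != person then nl ++ [nj] else nl) nl) nl
        = nl ++ e.keys.flatMap (fun nj =>
            if nj != person then ((e.getD nj []).filter (fun nk => nk == ni)).map (fun _ => nj)
            else []) := by
    intro ni nl
    simp only [pv_networks_inner]
    rw [PySem.List.foldl_append_eq_flatMap]
  simp only [step1]
  rw [PySem.List.foldl_append_eq_flatMap]
  simp

-- pvMem is unchanged by A's defaulting of the person key
theorem pv_mem_default (nd : PySem.Dict String (List String)) (person ni : String) :
    pvMem (if nd.contains person then nd else nd.insert person []) person ni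
      = pvMem nd person ni := by
  cases h : nd.contains person with
  | true => simp
  | false =>
    unfold pvMem
    rw [if_neg (by simp : ¬ false = true)]
    rw [PySem.Dict.keys_insert_of_not_contains nd [] h, List.flatMap_append]
    have hperson : ∀ x : String, (nd.insert person []).getD x ([] : List String) = nd.getD x [] := by
      intro x
      have := pv_getD_default nd person x
      rw [if_neg (by simp [h] : ¬ nd.contains person = true)] at this
      exact this
    simp only [hperson]
    simp

theorem pv_nseq_default (nd : PySem.Dict String (List String)) (person : String) :
    pvNSeq (if nd.contains person then nd else nd.insert person []) person = pvNSeq nd person := by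
  unfold pvNSeq
  simp only [pv_mem_default, pv_getD_default]

theorem pv_fseq_default (fd : PySem.Dict String (List String)) (person : String) :
    pvFSeq (if fd.contains person then fd else fd.insert person []) person = pvFSeq fd person := by
  unfold pvFSeq
  simp only [pv_getD_default]

-- B's friend pass folds pvIns over pvFSeq
theorem pv_b_friends (person : String) (fd : PySem.Dict String (List String))
    (s0 : PySem.Dict String Int) :
    (fd.getD person []).foldl (fun s pi =>
        (fd.getD pi []).foldl (fun s pk =>
          if pk != person then s.insert pk (s.getD pk 0 + 1) else s) s) s0
      = (pvFSeq fd person).foldl pvIns s0 := by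
  unfold pvFSeq
  rw [List.foldl_flatMap]
  congr 1
  funext s pi
  rw [List.foldl_filter]
  simp [pvIns]

-- B's inverse index, looked up at a network ni that person is in:
-- the members of ni other than person, in key order, one entry per occurrence
theorem pv_members_getD (person : String) (nd : PySem.Dict String (List String))
    (hnd : nd.keys.Nodup) (pnets : List String) (ni : String) (hni : ni ∈ pnets) :
    (nd.items.foldl (fun m p =>
        if p.1 != person then
          p.2.foldl (fun m nk =>
            if (PySem.Set.ofList pnets).contains nk then m.modify nk [] (· ++ [p.1]) else m) m
        else m)
        (PySem.Dict.empty : PySem.Dict String (List String))).getD ni []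
      = pvMem nd person ni := by
  have hfold : ∀ (its : List (String × List String)) (m : PySem.Dict String (List String)),
      its.foldl (fun m p =>
        if p.1 != person then
          p.2.foldl (fun m nk =>
            if (PySem.Set.ofList pnets).contains nk then m.modify nk [] (· ++ [p.1]) else m) m
        else m) m
      = (its.flatMap (fun p =>
          if p.1 != person then
            ((p.2.filter (fun nk => (PySem.Set.ofList pnets).contains nk)).map (fun nk => (nk, p.1)))
          else [])).foldl (fun m q => m.modify q.1 [] (· ++ [q.2])) m := by
    intro its m
    rw [List.foldl_flatMap]
    congr 1
    funext m p
    by_cases h : p.1 = person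
    · simp [h]
    · have h' : (p.1 != person) = true := by simp [h]
      simp only [h', if_true]
      rw [List.foldl_map, List.foldl_filter]
  rw [hfold, PySem.Dict.getD_foldl_modify_append]
  rw [List.filter_flatMap, List.map_flatMap]
  rw [PySem.Dict.items_eq_map_keys nd hnd [], List.flatMap_map]
  unfold pvMem
  have hempty : (PySem.Dict.empty : PySem.Dict String (List String)).getD ni [] = [] := by
    simp [PySem.Dict.getD_of_not_contains]
  rw [hempty, List.nil_append]
  congr 1
  funext nj
  by_cases h : nj = person
  · simp [h]
  · have h' : (nj != person) = true := by simp [h]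
    simp only [h', if_true]
    rw [List.filter_map, List.filter_filter]
    have hrw : (nd.getD nj []).filter
          (fun nk => ((fun q : String × String => q.1 == ni) ∘ fun nk => (nk, nj)) nk
            && (PySem.Set.ofList pnets).contains nk)
        = (nd.getD nj []).filter (fun nk => nk == ni) := by
      apply List.filter_congr
      intro nk _
      by_cases hne : nk = ni
      · subst hne
        simp [PySem.Set.contains, PySem.Set.mem_ofList, hni]
      · simp [hne]
    rw [hrw]
    simp [Function.comp_def]

-- B's network pass folds pvIns over pvNSeq
theorem pv_b_networks (person : String) (nd : PySem.Dict String (List String))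
    (hnd : nd.keys.Nodup) (s1 : PySem.Dict String Int) :
    (if (nd.getD person []).isEmpty then s1
     else
       (nd.getD person []).foldl (fun s ni =>
         ((nd.items.foldl (fun m p =>
             if p.1 != person then
               p.2.foldl (fun m nk =>
                 if (PySem.Set.ofList (nd.getD person [])).contains nk then
                   m.modify nk [] (· ++ [p.1])
                 else m) m
             else m)
             (PySem.Dict.empty : PySem.Dict String (List String))).getD ni []).foldl
           (fun s pj => s.insert pj (s.getD pj 0 + 1)) s) s1)
      = (pvNSeq nd person).foldl pvIns s1 := by
  cases hp : (nd.getD person []).isEmpty with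
  | true =>
    have : nd.getD person [] = [] := List.isEmpty_iff.mp hp
    simp [pvNSeq, this]
  | false =>
    rw [if_neg (by simp)]
    unfold pvNSeq
    rw [List.foldl_flatMap]
    apply PySem.List.foldl_congr_mem
    intro s ni hni
    rw [pv_members_getD person nd hnd (nd.getD person []) ni hni]
    rfl

-- ===== VERDICT (by name: the statement is the Claim_ definition above) =====
theorem basic_recommend_spec : Claim_equal_basic_recommend := by
  intro person p2f p2n _
  show basic_recommend person p2f p2n = basic_recommend_alt person p2f p2n
  unfold basic_recommend basic_recommend_alt
  simp only [pvIns_branch]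
  rw [pv_rf_closed person _ (pv_nodup_default (pvToDict p2f) person (pv_nodup_toDict p2f))]
  rw [pv_rn_closed person _]
  rw [pv_fseq_default, pv_nseq_default]
  rw [pv_b_friends, pv_b_networks person (pvToDict p2n) (pv_nodup_toDict p2n)]
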